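-- pv_equiv track=rewrite | github.com/BFl47/1.1.Fondamenti-di-Informatica-I | 1.Esercitazioni/LabPython07/A_Ex7.py | A_Ex7
-- ===== SOURCE A (Python) =====
-- def A_Ex7(s):
-- ##    l=[]
-- ##    for i in range(len(s)):
-- ##        if (ord(s[i])>=ord('A')) and (ord(s[i])<=ord('Z')) and (s[i] not in l):
-- ##            l.append(s[i])
-- ##    l.sort()
-- ##    return l
--
--     ins=set()
--     for i in range(len(s)):
--         if ord(s[i])>=ord('A') and ord(s[i])<=ord('Z'):
--             ins.add(s[i])
--     l=list(ins)
--     l.sort()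
--     return l
-- ===== SOURCE B (Python) =====
-- def A_Ex7(s):
--     return [chr(k) for k in range(ord('A'), ord('Z') + 1) if chr(k) in s]
-- ===== Notes on version B (the rewrite author's own statement) =====
-- stated objective: faster
-- what changed: Instead of scanning the input to collect uppercase letters into a set and sorting it, B enumerates the fixed 26-letter alphabet A..Z in order and keeps each letter that occurs in s, so no per-character set insertion and no sort are needed.
import Mathlib
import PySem

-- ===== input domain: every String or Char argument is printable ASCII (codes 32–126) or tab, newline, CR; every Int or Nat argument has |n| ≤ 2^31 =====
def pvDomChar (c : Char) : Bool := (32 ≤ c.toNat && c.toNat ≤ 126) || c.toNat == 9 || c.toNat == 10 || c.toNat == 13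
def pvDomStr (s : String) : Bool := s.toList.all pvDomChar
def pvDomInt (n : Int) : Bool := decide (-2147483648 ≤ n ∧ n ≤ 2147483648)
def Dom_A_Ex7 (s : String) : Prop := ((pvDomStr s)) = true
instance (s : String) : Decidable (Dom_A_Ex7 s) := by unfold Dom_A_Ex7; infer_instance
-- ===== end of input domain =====

-- B enumerates the fixed alphabet A..Z in order and keeps the letters occurring in s,
-- replacing A's scan-into-a-set-then-sort; same return value, no side effects.

-- ===== PORT A =====
-- A: ins = set(); for i in range(len(s)): if ord('A') <= ord(s[i]) <= ord('Z'): ins.add(s[i]);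
--    l = list(ins); l.sort(); return l   (list(ins) then sort is order-independent: ported as sorted(ins))
def A_Ex7 (s : String) : List String :=
  let cs := s.toList
  let ins : PySem.Set String :=
    (PySem.List.pyRange 0 (PySem.List.len cs) 1).foldl
      (fun ins i =>
        if 65 ≤ (PySem.List.pyGetD cs i ' ').toNat ∧ (PySem.List.pyGetD cs i ' ').toNat ≤ 90
        then PySem.Set.add ins (String.ofList [PySem.List.pyGetD cs i ' '])
        else ins)
      PySem.Set.empty
  PySem.List.sorted ins (fun x => x) false

-- ===== PORT B =====
-- B: [chr(k) for k in range(ord('A'), ord('Z') + 1) if chr(k) in s]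
def A_Ex7_alt (s : String) : List String :=
  ((PySem.List.pyRange 65 91 1).filter
      (fun k => PySem.Str.isIn (String.ofList [Char.ofNat k.toNat]) s)).map
    (fun k => String.ofList [Char.ofNat k.toNat])

-- ===== PRECONDITION & SPEC =====
def Spec_A_Ex7 (s : String) (out : List String) : Prop := out = A_Ex7_alt s
instance (s : String) (out : List String) : Decidable (Spec_A_Ex7 s out) := by unfold Spec_A_Ex7; infer_instance

-- ===== CLAIM (what is proved, stated in full; the proofs are below) =====
def Claim_equal_A_Ex7 : Prop := ∀ (s : String), Dom_A_Ex7 s → Spec_A_Ex7 s (A_Ex7 s)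

-- ===== LEMMAS AND PROOFS =====

-- A's set-building loop yields set(one-char strings of the uppercase chars of s), then sorted
theorem A_Ex7_eq_sorted_ofList (s : String) :
    A_Ex7 s = PySem.List.sorted
      (PySem.Set.ofList ((s.toList.filter (fun c => decide (65 ≤ c.toNat ∧ c.toNat ≤ 90))).map
        (fun c => String.ofList [c]))) (fun x => x) false := by
  unfold A_Ex7
  dsimp only
  rw [PySem.List.foldl_pyRange_pyGetD
        (f := fun (ins : PySem.Set String) c =>
          if 65 ≤ c.toNat ∧ c.toNat ≤ 90 then PySem.Set.add ins (String.ofList [c]) else ins)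
        (xs := s.toList) (d := ' ') (init := PySem.Set.empty) (a := 0) (by norm_num)]
  rw [PySem.List.foldl_ite_eq_foldl_filter]
  rw [← PySem.Set.update_map_eq_foldl_add]
  simp [PySem.Set.empty, PySem.Set.update_nil_left]

theorem toNat_ofNat_le90 (n : Nat) (h : n ≤ 90) : (Char.ofNat n).toNat = n := by
  have hv : n.isValidChar := Or.inl (by omega)
  rw [Char.ofNat, dif_pos hv]
  rfl

theorem singleton_str_lt (c d : Char) (h : c < d) :
    String.ofList [c] < String.ofList [d] := by
  rw [String.lt_iff_toList_lt]
  simpa using List.Lex.rel h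

theorem B_pairwise_lt (s : String) : (A_Ex7_alt s).Pairwise (· < ·) := by
  unfold A_Ex7_alt
  rw [List.pairwise_map]
  apply List.Pairwise.filter
  have h : (PySem.List.pyRange 65 91 1).Pairwise
      (fun a b => Char.ofNat a.toNat < Char.ofNat b.toNat) := by decide
  exact h.imp fun hab => singleton_str_lt _ _ hab

theorem mem_B_iff (s : String) (x : String) :
    x ∈ A_Ex7_alt s ↔ ∃ c ∈ s.toList, (65 ≤ c.toNat ∧ c.toNat ≤ 90) ∧ x = String.ofList [c] := by
  unfold A_Ex7_alt
  simp only [List.mem_map, List.mem_filter, PySem.List.mem_pyRange_one]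
  constructor
  · rintro ⟨k, ⟨⟨hk65, hk91⟩, hin⟩, rfl⟩
    have htn : (Char.ofNat k.toNat).toNat = k.toNat := toNat_ofNat_le90 _ (by omega)
    refine ⟨Char.ofNat k.toNat, ?_, ⟨by omega, by omega⟩, rfl⟩
    have := (PySem.Str.isIn_iff_infix _ _).mp hin
    simpa [List.singleton_infix_iff] using this
  · rintro ⟨c, hmem, ⟨h65, h90⟩, rfl⟩
    refine ⟨(c.toNat : Int), ⟨⟨by exact_mod_cast h65, by exact_mod_cast (by omega : c.toNat < 91)⟩, ?_⟩, ?_⟩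
    · rw [PySem.Str.isIn_iff_infix]
      simp only [Int.toNat_natCast, Char.ofNat_toNat, String.toList_ofList]
      exact (List.singleton_infix_iff _ _).mpr hmem
    · simp [Char.ofNat_toNat]

theorem main_lemma (s : String) : A_Ex7 s = A_Ex7_alt s := by
  rw [A_Ex7_eq_sorted_ofList]
  apply PySem.List.sorted_eq_of_perm_of_pairwise_lt
  · rw [List.perm_ext_iff_of_nodup
      ((B_pairwise_lt s).imp fun h => ne_of_lt h) (PySem.Set.nodup_ofList _)]
    intro x
    rw [mem_B_iff, PySem.Set.mem_ofList]
    simp only [List.mem_map, List.mem_filter, decide_eq_true_eq]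
    constructor
    · rintro ⟨c, h1, h2, rfl⟩; exact ⟨c, ⟨h1, h2⟩, rfl⟩
    · rintro ⟨c, ⟨h1, h2⟩, rfl⟩; exact ⟨c, h1, h2, rfl⟩
  · exact B_pairwise_lt s

-- ===== VERDICT (by name: the statement is the Claim_ definition above) =====
theorem A_Ex7_spec : Claim_equal_A_Ex7 := by
  intro s _
  unfold Spec_A_Ex7
  exact main_lemma s
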